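-- pv_equiv track=rewrite | github.com/sjerkovic/Bioinformatics-specialization | b2week3.py | Consistent
-- ===== SOURCE A (Python) =====
-- def LinearSpectrumWithMasses(Peptide):
--     PrefixMass = {}
--     PrefixMass[0] = 0
--     for i in range(1, len(Peptide) + 1):
--         PrefixMass[i] = PrefixMass[i - 1] + Peptide[i - 1]
--     LinearSpectrum = [0]
--
--     for i in range(len(Peptide)):
--         for j in range(i + 1, len(Peptide) + 1):
--             LinearSpectrum.append(PrefixMass[j] - PrefixMass[i])
--     LinearSpectrum = sorted(LinearSpectrum)
--     return LinearSpectrum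
--
-- def Consistent(Peptide, Spectrum):
--     ls = LinearSpectrumWithMasses(Peptide)
--     s = Spectrum[:]
--     for i in ls:
--         if i in s:
--             s.remove(i)
--         else:
--             return False
--     return True
-- ===== SOURCE B (Python) =====
-- def Consistent(Peptide, Spectrum):
--     # prefix sums kept as a list; the linear spectrum needs no sorting because
--     # the check is an aggregate multiset comparison (counts), not a scan-and-remove.
--     prefix = [0]
--     total = 0
--     for m in Peptide:
--         total += m
--         prefix.append(total)
--     n = len(Peptide)
--     ls = [0] + [prefix[j] - prefix[i] for i in range(n) for j in range(i + 1, n + 1)]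
--     return all(ls.count(m) <= Spectrum.count(m) for m in set(ls))
-- ===== Notes on version B (the rewrite author's own statement) =====
-- stated objective: alternative
-- what changed: The iterate-and-remove loop over the sorted linear spectrum is replaced by an aggregate multiset comparison (for every distinct mass, count in the linear spectrum <= count in Spectrum), which also removes the sorting step; prefix masses are a plain running-sum list instead of a dict.
import Mathlib
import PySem

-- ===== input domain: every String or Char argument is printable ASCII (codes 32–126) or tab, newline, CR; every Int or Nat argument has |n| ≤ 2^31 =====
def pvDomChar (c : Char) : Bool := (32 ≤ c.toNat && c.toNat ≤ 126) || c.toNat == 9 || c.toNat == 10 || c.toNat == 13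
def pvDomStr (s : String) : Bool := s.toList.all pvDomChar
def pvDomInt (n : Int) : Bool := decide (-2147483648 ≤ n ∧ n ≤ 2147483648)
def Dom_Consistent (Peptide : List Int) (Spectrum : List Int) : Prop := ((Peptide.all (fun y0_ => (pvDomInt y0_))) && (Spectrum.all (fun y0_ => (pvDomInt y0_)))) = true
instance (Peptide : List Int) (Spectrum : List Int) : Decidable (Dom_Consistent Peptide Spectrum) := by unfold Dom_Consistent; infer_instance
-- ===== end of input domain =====

-- B replaces A's scan-and-remove over the sorted linear spectrum by an aggregate
-- per-mass count comparison (no sorting, no removal); same return value, proved below.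

-- ===== PORT A =====
-- PrefixMass dict of A; the lookups PrefixMass[k] and Peptide[i-1] in A's loops always
-- hit an existing key / in-range index, so the getD/pyGetD defaults never fire (exact).
def pvPrefixMassDict (Peptide : List Int) : PySem.Dict Int Int :=
  (PySem.List.pyRange 1 ((PySem.List.len Peptide) + 1) 1).foldl
    (fun d i => d.insert i (d.getD (i - 1) 0 + PySem.List.pyGetD Peptide (i - 1) 0))
    ((PySem.Dict.empty).insert 0 0)

def pvLinearSpectrumWithMasses (Peptide : List Int) : List Int :=
  let PrefixMass := pvPrefixMassDict Peptide
  let n := PySem.List.len Peptide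
  let LinearSpectrum :=
    (PySem.List.pyRange 0 n 1).foldl
      (fun acc i =>
        (PySem.List.pyRange (i + 1) (n + 1) 1).foldl
          (fun acc2 j => acc2 ++ [PrefixMass.getD j 0 - PrefixMass.getD i 0]) acc)
      [0]
  PySem.List.sorted LinearSpectrum (fun x => x) false

-- the for-loop of Consistent: 'if i in s: s.remove(i) else: return False'
-- (s.remove(i) under 'i in s' is exactly List.erase, the first occurrence)
def pvConsistentLoop (ls : List Int) (s : List Int) : Bool :=
  match ls with
  | [] => true
  | i :: rest => if i ∈ s then pvConsistentLoop rest (s.erase i) else false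

def Consistent (Peptide : List Int) (Spectrum : List Int) : Bool :=
  pvConsistentLoop (pvLinearSpectrumWithMasses Peptide) Spectrum

-- ===== PORT B =====
-- running-sum prefix list of Source B
def pvPrefixSums (Peptide : List Int) : List Int :=
  (Peptide.foldl (fun (st : List Int × Int) m =>
      (st.1 ++ [st.2 + m], st.2 + m)) ([0], 0)).1

-- [0] + [prefix[j] - prefix[i] for i in range(n) for j in range(i+1, n+1)]
def pvLinearSpectrumAlt (Peptide : List Int) : List Int :=
  let pfx := pvPrefixSums Peptide
  let n := PySem.List.len Peptide
  0 :: (PySem.List.pyRange 0 n 1).flatMap (fun i =>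
        (PySem.List.pyRange (i + 1) (n + 1) 1).map (fun j =>
          PySem.List.pyGetD pfx j 0 - PySem.List.pyGetD pfx i 0))

-- all(ls.count(m) <= Spectrum.count(m) for m in set(ls)); a Bool independent of
-- the set's iteration order, so consuming the PySem.Set with 'all' is exact
def Consistent_alt (Peptide : List Int) (Spectrum : List Int) : Bool :=
  let ls := pvLinearSpectrumAlt Peptide
  (PySem.Set.ofList ls).all (fun m => decide (ls.count m ≤ Spectrum.count m))

-- ===== PRECONDITION & SPEC =====
def Spec_Consistent (Peptide : List Int) (Spectrum : List Int) (out : Bool) : Prop := out = Consistent_alt Peptide Spectrum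
instance (Peptide : List Int) (Spectrum : List Int) (out : Bool) : Decidable (Spec_Consistent Peptide Spectrum out) := by unfold Spec_Consistent; infer_instance

-- ===== CLAIM (what is proved, stated in full; the proofs are below) =====
def Claim_equal_Consistent : Prop := ∀ (Peptide : List Int) (Spectrum : List Int), Dom_Consistent Peptide Spectrum → Spec_Consistent Peptide Spectrum (Consistent Peptide Spectrum)

-- ===== LEMMAS AND PROOFS =====

-- the common reference value: sum of the first k masses of the peptide
def pvPsum (xs : List Int) (k : Nat) : Int := (xs.take k).sum

theorem pvFoldlPrefix (xs : List Int) (l : List Int) (t : Int) :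
    xs.foldl (fun (st : List Int × Int) m => (st.1 ++ [st.2 + m], st.2 + m)) (l, t) =
    (l ++ (List.range xs.length).map (fun k => t + (xs.take (k+1)).sum), t + xs.sum) := by
  induction xs generalizing l t with
  | nil => simp
  | cons m rest ih =>
    simp only [List.foldl_cons, ih, List.length_cons, List.range_succ_eq_map, List.map_cons,
      List.map_map]
    refine Prod.ext ?_ ?_
    · simp only [List.append_assoc, List.singleton_append, List.take_succ_cons, List.sum_cons,
        List.take_zero, List.sum_nil, Function.comp_def, Nat.succ_eq_add_one, zero_add, add_zero]
      congr 1
      congr 1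
      apply List.map_congr_left; intro k hk; ring
    · simp; ring

theorem pvPrefixSums_eq (xs : List Int) :
    pvPrefixSums xs = (List.range (xs.length + 1)).map (fun k => pvPsum xs k) := by
  unfold pvPrefixSums pvPsum
  rw [pvFoldlPrefix]
  simp [List.range_succ_eq_map, Function.comp]

theorem pvPrefixSums_getD (xs : List Int) (j : Int) (h0 : 0 ≤ j) (h1 : j ≤ xs.length) :
    PySem.List.pyGetD (pvPrefixSums xs) j 0 = pvPsum xs j.toNat := by
  rw [pvPrefixSums_eq]
  rw [show j = ((j.toNat : Nat) : Int) by omega, PySem.List.pyGetD_natCast]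
  rw [List.getD_eq_getElem?_getD]
  rw [List.getElem?_map]
  rw [List.getElem?_range (by omega)]
  simp
  congr 1
  omega

theorem pvPsum_succ (xs : List Int) (m : Nat) (hm : m < xs.length) :
    pvPsum xs (m + 1) = pvPsum xs m + xs.getD m 0 := by
  unfold pvPsum
  rw [List.take_add_one, List.sum_append]
  simp [List.getElem?_eq_getElem hm, List.getD_eq_getElem?_getD]

theorem pvDictAux (xs : List Int) (m : Nat) (hm : m ≤ xs.length) :
    ∀ j : Int, 0 ≤ j → j ≤ m →
    ((PySem.List.pyRange 1 ((m : Int) + 1) 1).foldl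
      (fun d i => d.insert i (d.getD (i - 1) 0 + PySem.List.pyGetD xs (i - 1) 0))
      ((PySem.Dict.empty).insert 0 0)).getD j 0 = pvPsum xs j.toNat := by
  induction m with
  | zero =>
    intro j h0 h1
    rw [PySem.List.pyRange_one_eq_nil (by omega)]
    have hj : j = 0 := by omega
    subst hj
    simp [pvPsum]
  | succ m ih =>
    intro j h0 h1
    have hstep : ((m + 1 : Nat) : Int) + 1 = ((m : Int) + 1) + 1 := by push_cast; ring
    rw [hstep, PySem.List.pyRange_one_succ_right (by omega), List.foldl_append]
    simp only [List.foldl_cons, List.foldl_nil]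
    rw [PySem.Dict.getD_insert]
    by_cases hj : j = (m : Int) + 1
    · rw [if_pos hj]
      have h1' : ((m : Int) + 1 - 1) = ((m : Nat) : Int) := by ring
      rw [h1', ih (by omega) (m : Int) (by omega) (by omega), PySem.List.pyGetD_natCast]
      have : j.toNat = m + 1 := by omega
      rw [this, pvPsum_succ xs m (by omega)]
      congr 1
    · rw [if_neg hj]
      exact ih (by omega) j h0 (by omega)

theorem pvPrefixMassDict_getD (xs : List Int) (j : Int) (h0 : 0 ≤ j) (h1 : j ≤ xs.length) :
    (pvPrefixMassDict xs).getD j 0 = pvPsum xs j.toNat := by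
  unfold pvPrefixMassDict
  rw [show PySem.List.len xs = ((xs.length : Nat) : Int) by simp [PySem.List.len]]
  exact pvDictAux xs xs.length le_rfl j h0 h1

-- A's sorted linear spectrum is B's comprehension, sorted
theorem pvLinearSpectrumWithMasses_eq (xs : List Int) :
    pvLinearSpectrumWithMasses xs = PySem.List.sorted (pvLinearSpectrumAlt xs) (fun x => x) false := by
  unfold pvLinearSpectrumWithMasses pvLinearSpectrumAlt
  simp only [PySem.List.foldl_append_singleton_eq_map, PySem.List.foldl_append_eq_flatMap]
  congr 1
  simp only [List.singleton_append]
  congr 1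
  apply List.flatMap_congr
  intro i hi
  rw [PySem.List.mem_pyRange_one] at hi
  apply List.map_congr_left
  intro j hj
  rw [PySem.List.mem_pyRange_one] at hj
  simp only [PySem.List.len_eq] at hi hj ⊢
  rw [pvPrefixMassDict_getD xs j (by omega) (by omega),
      pvPrefixMassDict_getD xs i (by omega) (by omega),
      pvPrefixSums_getD xs j (by omega) (by omega),
      pvPrefixSums_getD xs i (by omega) (by omega)]

-- A's scan-and-remove loop succeeds exactly on a multiset inclusion
theorem pvConsistentLoop_iff (ls s : List Int) :
    pvConsistentLoop ls s = true ↔ ∀ m : Int, ls.count m ≤ s.count m := by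
  induction ls generalizing s with
  | nil => simp [pvConsistentLoop]
  | cons i rest ih =>
    simp only [pvConsistentLoop]
    by_cases hmem : i ∈ s
    · rw [if_pos hmem, ih]
      have hpos : 1 ≤ s.count i := List.count_pos_iff.mpr hmem
      constructor
      · intro h m
        have := h m
        rw [List.count_erase] at this
        rw [List.count_cons]
        by_cases he : m = i
        · subst he; simp at this ⊢; omega
        · have hne : (i == m) = false := by simp [Ne.symm he]
          simp [hne] at this ⊢
          omega
      · intro h m
        have := h m
        rw [List.count_erase, List.count_cons] at *
        by_cases he : m = i
        · subst he; simp at this ⊢; omega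
        · have hne : (i == m) = false := by simp [Ne.symm he]
          simp [hne] at this ⊢
          omega
    · rw [if_neg hmem]
      simp only [Bool.false_eq_true, false_iff]
      intro h
      have := h i
      rw [List.count_eq_zero_of_not_mem hmem] at this
      simp [List.count_cons_self] at this

-- ===== VERDICT (by name: the statement is the Claim_ definition above) =====
theorem Consistent_spec : Claim_equal_Consistent := by
  intro Peptide Spectrum _
  unfold Spec_Consistent Consistent Consistent_alt
  rw [pvLinearSpectrumWithMasses_eq]
  have hperm : (PySem.List.sorted (pvLinearSpectrumAlt Peptide) (fun x => x) false).Perm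
      (pvLinearSpectrumAlt Peptide) := PySem.List.sorted_perm _ _ _
  rw [Bool.eq_iff_iff]
  rw [pvConsistentLoop_iff, List.all_eq_true]
  constructor
  · intro h m hm
    simp only [decide_eq_true_eq]
    have := h m
    rwa [hperm.count_eq] at this
  · intro h m
    rw [hperm.count_eq]
    by_cases hm : m ∈ pvLinearSpectrumAlt Peptide
    · have := h m ((PySem.Set.mem_ofList _ _).mpr hm)
      simpa using this
    · rw [List.count_eq_zero_of_not_mem hm]
      exact Nat.zero_le _
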